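-- pv_equiv track=rewrite | github.com/jonmartz/DL3 | LyricGenerator.py | get_x_midi_sliced
-- ===== SOURCE A (Python) =====
-- def get_x_midi_sliced(words, slice_indexes):
--     """
--     Get the indexes of midi slices in set, to be used by the method "get_set"
--     :param words:
--     :param slice_indexes:
--     :return:
--     """
--     x_midi_sliced = []
--     midi_slice_idx = 0
--     for word in words:
--         x_midi_sliced.append(slice_indexes[midi_slice_idx])
--         if word == '&':  # end of phrase
--             midi_slice_idx += 1
--     return x_midi_sliced
-- ===== SOURCE B (Python) =====
-- def get_x_midi_sliced(words, slice_indexes):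
--     # Phrase-based batching: count the words of each phrase and replicate its
--     # slice index once per phrase, instead of indexing per word.
--     x_midi_sliced = []
--     phrase = 0
--     run = 0
--     for word in words:
--         if word == '&':
--             x_midi_sliced.extend([slice_indexes[phrase]] * (run + 1))
--             phrase += 1
--             run = 0
--         else:
--             run += 1
--     if run > 0:
--         x_midi_sliced.extend([slice_indexes[phrase]] * run)
--     return x_midi_sliced
-- ===== Notes on version B (the rewrite author's own statement) =====
-- stated objective: alternative
-- what changed: B batches per phrase: it counts the run of words in the current phrase and extends the result with the phrase's slice index replicated run-length times (one indexed access per phrase), instead of A's one indexed append per word.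
import Mathlib
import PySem

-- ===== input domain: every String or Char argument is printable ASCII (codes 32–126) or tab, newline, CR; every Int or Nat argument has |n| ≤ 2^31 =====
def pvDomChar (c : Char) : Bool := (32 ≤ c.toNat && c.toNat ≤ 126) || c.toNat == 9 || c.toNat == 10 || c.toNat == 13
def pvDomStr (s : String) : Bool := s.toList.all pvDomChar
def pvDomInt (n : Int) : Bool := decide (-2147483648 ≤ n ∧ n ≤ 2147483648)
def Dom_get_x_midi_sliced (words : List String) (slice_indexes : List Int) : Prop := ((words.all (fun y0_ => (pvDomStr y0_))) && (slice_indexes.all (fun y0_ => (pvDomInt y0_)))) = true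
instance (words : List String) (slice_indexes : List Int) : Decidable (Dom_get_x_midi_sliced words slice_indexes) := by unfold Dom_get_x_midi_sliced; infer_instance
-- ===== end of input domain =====

-- B assigns slice indexes per phrase via run-length replication instead of A's per-word indexed append (alternative decomposition, same cost).


-- ===== PORT A =====
-- loop body of A: append slice_indexes[midi_slice_idx], bump the index after '&'
-- (slice_indexes[...] is in range under Pre_, where pyGetD is exact for Python's indexing)
def stepA (slice_indexes : List Int) (st : List Int × Int) (word : String) : List Int × Int :=
  let st := (st.1 ++ [PySem.List.pyGetD slice_indexes st.2 0], st.2)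
  if word == "&" then (st.1, st.2 + 1) else st

def get_x_midi_sliced (words : List String) (slice_indexes : List Int) : List Int :=
  (words.foldl (stepA slice_indexes) ([], 0)).1

-- ===== PORT B =====
-- loop body of B: on '&' flush the current run (run+1 copies of the phrase's index), else grow the run
def stepB (slice_indexes : List Int) (st : List Int × Int × Int) (word : String) : List Int × Int × Int :=
  if word == "&" then
    (st.1 ++ List.replicate (st.2.2 + 1).toNat (PySem.List.pyGetD slice_indexes st.2.1 0), st.2.1 + 1, 0)
  else
    (st.1, st.2.1, st.2.2 + 1)

def get_x_midi_sliced_alt (words : List String) (slice_indexes : List Int) : List Int :=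
  let st := words.foldl (stepB slice_indexes) ([], 0, 0)
  if st.2.2 > 0 then
    st.1 ++ List.replicate st.2.2.toNat (PySem.List.pyGetD slice_indexes st.2.1 0)
  else st.1

-- ===== PRECONDITION & SPEC =====
-- Pre_ excludes exactly the inputs on which Python A raises IndexError: the running
-- phrase index (count of '&' among all words before the last one, plus the access at
-- the last word itself) must stay below len(slice_indexes).
def Pre_get_x_midi_sliced (words : List String) (slice_indexes : List Int) : Prop :=
  words = [] ∨ words.dropLast.count "&" < slice_indexes.length
instance (words : List String) (slice_indexes : List Int) : Decidable (Pre_get_x_midi_sliced words slice_indexes) := by unfold Pre_get_x_midi_sliced; infer_instance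

def pvWitness_get_x_midi_sliced : List String × List Int := (["hello", "there", "&", "world"], [3, 7])

def Spec_get_x_midi_sliced (words : List String) (slice_indexes : List Int) (out : List Int) : Prop := out = get_x_midi_sliced_alt words slice_indexes
instance (words : List String) (slice_indexes : List Int) (out : List Int) : Decidable (Spec_get_x_midi_sliced words slice_indexes out) := by unfold Spec_get_x_midi_sliced; infer_instance

-- ===== CLAIM (what is proved, stated in full; the proofs are below) =====
def Claim_equal_get_x_midi_sliced : Prop := ∀ (words : List String) (slice_indexes : List Int), Dom_get_x_midi_sliced words slice_indexes → Pre_get_x_midi_sliced words slice_indexes → Spec_get_x_midi_sliced words slice_indexes (get_x_midi_sliced words slice_indexes)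

-- ===== LEMMAS AND PROOFS =====

-- common characterisation: the stream of indexes A produces from phrase k onward
def specRun (slice_indexes : List Int) : List String → Int → List Int
  | [], _ => []
  | w :: t, k =>
      PySem.List.pyGetD slice_indexes k 0 :: specRun slice_indexes t (if w == "&" then k + 1 else k)

theorem foldA_eq (si : List Int) (ws : List String) :
    ∀ (res : List Int) (k : Int),
      (ws.foldl (stepA si) (res, k)).1 = res ++ specRun si ws k := by
  induction ws with
  | nil => intro res k; simp [specRun]
  | cons w t ih =>
      intro res k
      by_cases h : w == "&" <;> simp [stepA, h, specRun, ih]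

theorem foldB_eq (si : List Int) (ws : List String) :
    ∀ (res : List Int) (p r : Int), 0 ≤ r →
      (let st := ws.foldl (stepB si) (res, p, r)
       if st.2.2 > 0 then
         st.1 ++ List.replicate st.2.2.toNat (PySem.List.pyGetD si st.2.1 0)
       else st.1)
      = res ++ List.replicate r.toNat (PySem.List.pyGetD si p 0) ++ specRun si ws p := by
  induction ws with
  | nil =>
      intro res p r hr
      simp only [List.foldl_nil, specRun]
      split
      · simp
      · next hrle =>
          have hr0 : r = 0 := by omega
          subst hr0; simp
  | cons w t ih =>
      intro res p r hr
      have hsucc : (r + 1).toNat = r.toNat + 1 := by omega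
      by_cases h : w == "&"
      · simp only [List.foldl_cons, stepB, h, if_true, specRun]
        rw [ih _ _ 0 le_rfl]
        simp [hsucc, List.replicate_succ']
      · simp only [List.foldl_cons, stepB, h, Bool.false_eq_true, if_false, specRun]
        rw [ih _ _ (r + 1) (by omega)]
        simp [hsucc, List.replicate_succ']

-- ===== VERDICT (by name: the statement is the Claim_ definition above) =====
theorem get_x_midi_sliced_spec : Claim_equal_get_x_midi_sliced := by
  intro words slice_indexes _ _
  unfold Spec_get_x_midi_sliced get_x_midi_sliced get_x_midi_sliced_alt
  rw [foldA_eq, foldB_eq slice_indexes words [] 0 0 le_rfl]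
  simp
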